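-- pv_equiv track=rewrite | github.com/al1brn/geonodes | nodes/utils.py | add_rank_OLD
-- ===== SOURCE A (Python) =====
-- def add_rank_OLD(args):
--     counts = {}
--     keys = []
--     for arg in args:
--         if arg in counts:
--             counts[arg] += 1
--             keys.append(f"{arg}_{counts[arg]}")
--         else:
--             counts[arg] = 0
--             keys.append(arg)
--     return keys
-- ===== SOURCE B (Python) =====
-- def add_rank_OLD(args):
--     # Pass 1: total occurrence counts.
--     counts = {}
--     for a in args:
--         counts[a] = counts.get(a, 0) + 1
--     # Pass 2: walk backwards, decrementing; the remaining count is the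
--     # number of earlier occurrences, i.e. the rank suffix.
--     out = []
--     for a in reversed(args):
--         counts[a] -= 1
--         k = counts[a]
--         out.append(a if k == 0 else f"{a}_{k}")
--     out.reverse()
--     return out
-- ===== Notes on version B (the rewrite author's own statement) =====
-- stated objective: alternative
-- what changed: Replaces A's single forward pass with a running counter of seen occurrences by two passes: count total occurrences first, then walk the list backwards decrementing the totals (the remainder is the element's rank) and build the output in reverse.
import Mathlib
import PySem

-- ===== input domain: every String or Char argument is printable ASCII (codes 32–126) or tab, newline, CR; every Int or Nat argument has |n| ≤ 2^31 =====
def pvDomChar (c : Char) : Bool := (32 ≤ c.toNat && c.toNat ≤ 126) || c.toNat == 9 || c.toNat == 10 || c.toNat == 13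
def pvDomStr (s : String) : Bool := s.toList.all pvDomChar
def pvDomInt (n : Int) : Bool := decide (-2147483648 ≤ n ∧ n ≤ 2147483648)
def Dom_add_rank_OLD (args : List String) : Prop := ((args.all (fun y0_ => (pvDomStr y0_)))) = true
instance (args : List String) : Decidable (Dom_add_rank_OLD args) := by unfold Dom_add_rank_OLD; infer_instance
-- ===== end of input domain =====

-- B replaces A's forward pass with a running counter by two passes (total counts, then a
-- backward decrementing pass building the output in reverse); same return value, no speed claim.

-- ===== PORT A =====
-- literal port of A: one pass with a counts dict and an output accumulator
def add_rank_OLD (args : List String) : List String :=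
  (args.foldl
    (fun (st : PySem.Dict String Int × List String) arg =>
      if st.1.contains arg then
        let c := st.1.getD arg 0 + 1
        (st.1.insert arg c, st.2 ++ [arg ++ "_" ++ PySem.Int.toStr c])
      else
        (st.1.insert arg 0, st.2 ++ [arg]))
    ((PySem.Dict.empty : PySem.Dict String Int), [])).2

-- ===== PORT B =====
-- literal port of B: total counts, then a backward pass; 'counts[a] -= 1' is modify a 0 (· - 1)
-- (the default 0 is never used: after pass 1 every element of args is a key of counts)
def add_rank_OLD_alt (args : List String) : List String :=
  let counts := args.foldl
    (fun (d : PySem.Dict String Int) a => d.insert a (d.getD a 0 + 1))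
    (PySem.Dict.empty : PySem.Dict String Int)
  let out := args.reverse.foldl
    (fun (st : PySem.Dict String Int × List String) a =>
      let d := st.1.modify a 0 (· - 1)
      let k := d.getD a 0
      (d, st.2 ++ [if k = 0 then a else a ++ "_" ++ PySem.Int.toStr k]))
    (counts, [])
  out.2.reverse

-- ===== PRECONDITION & SPEC =====
def Spec_add_rank_OLD (args : List String) (out : List String) : Prop := out = add_rank_OLD_alt args
instance (args : List String) (out : List String) : Decidable (Spec_add_rank_OLD args out) := by unfold Spec_add_rank_OLD; infer_instance

-- ===== CLAIM (what is proved, stated in full; the proofs are below) =====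
def Claim_equal_add_rank_OLD : Prop := ∀ (args : List String), Dom_add_rank_OLD args → Spec_add_rank_OLD args (add_rank_OLD args)

-- ===== LEMMAS AND PROOFS =====

-- the common intermediate form: process `rest` given the already-seen prefix `p`;
-- each element is suffixed with the number of its occurrences in everything before it
def pvBuild (p rest : List String) : List String :=
  match rest with
  | [] => []
  | a :: rest' =>
    (if p.count a = 0 then a else a ++ "_" ++ PySem.Int.toStr ((p.count a : Nat) : Int))
      :: pvBuild (p ++ [a]) rest'

theorem pvBuild_append (l : List String) : ∀ (p : List String) (x : String),
    pvBuild p (l ++ [x]) = pvBuild p l ++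
      [if (p ++ l).count x = 0 then x
       else x ++ "_" ++ PySem.Int.toStr (((p ++ l).count x : Nat) : Int)] := by
  induction l with
  | nil => intro p x; simp [pvBuild]
  | cons a l' ih =>
    intro p x
    simp only [List.cons_append, pvBuild, ih (p ++ [a]) x, List.append_assoc,
      List.nil_append]

-- A's loop, generalized: the dict holds (count in prefix) - 1 for every seen key
theorem pvA_loop (rest : List String) : ∀ (p : List String) (d : PySem.Dict String Int)
    (out : List String)
    (hc : ∀ a, d.contains a = p.contains a)
    (hv : ∀ a, a ∈ p → d.getD a 0 = (p.count a : Int) - 1),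
    (rest.foldl
      (fun (st : PySem.Dict String Int × List String) arg =>
        if st.1.contains arg then
          let c := st.1.getD arg 0 + 1
          (st.1.insert arg c, st.2 ++ [arg ++ "_" ++ PySem.Int.toStr c])
        else
          (st.1.insert arg 0, st.2 ++ [arg]))
      (d, out)).2 = out ++ pvBuild p rest := by
  induction rest with
  | nil => intro p d out _ _; simp [pvBuild]
  | cons a rest' ih =>
    intro p d out hc hv
    simp only [List.foldl_cons]
    by_cases hmem : a ∈ p
    · have hcnt : p.count a ≠ 0 := by simpa [List.count_eq_zero] using hmem
      have hcontains : d.contains a = true := by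
        rw [hc]; simpa [List.contains_eq_mem] using hmem
      have hval : d.getD a 0 + 1 = ((p.count a : Nat) : Int) := by
        rw [hv a hmem]; ring
      rw [if_pos hcontains]
      simp only [hval]
      rw [ih (p ++ [a])]
      · simp [pvBuild, hcnt]
      · intro x
        rw [PySem.Dict.contains_insert, hc]
        simp [List.contains_eq_mem]
        by_cases hx : x = a <;> simp [hx, hmem]
      · intro x hx
        rw [PySem.Dict.getD_insert]
        by_cases hxa : x = a
        · subst hxa
          rw [if_pos rfl, List.count_append]
          simp
        · rw [if_neg hxa, List.count_append]
          have : x ∈ p := by simpa [hxa] using hx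
          simp [hv x this, Ne.symm hxa]
    · have hcnt : p.count a = 0 := by simpa [List.count_eq_zero] using hmem
      have hcontains : d.contains a = false := by
        rw [hc]; simpa [List.contains_eq_mem] using hmem
      rw [if_neg (by simp [hcontains])]
      rw [ih (p ++ [a])]
      · simp [pvBuild, hcnt]
      · intro x
        rw [PySem.Dict.contains_insert, hc]
        simp [List.contains_eq_mem]
        by_cases hx : x = a <;> simp [hx]
      · intro x hx
        rw [PySem.Dict.getD_insert]
        by_cases hxa : x = a
        · subst hxa
          simp [List.count_append, hcnt]
        · rw [if_neg hxa, List.count_append]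
          have : x ∈ p := by simpa [hxa] using hx
          simp [hv x this, Ne.symm hxa]

-- B's backward loop: processing rev (= the unprocessed part reversed) with the dict
-- holding the occurrence counts of pre ++ rev.reverse emits pvBuild's values in reverse
theorem pvB_loop (rev : List String) : ∀ (pre : List String) (d : PySem.Dict String Int)
    (out : List String)
    (hv : ∀ a, d.getD a 0 = ((pre ++ rev.reverse).count a : Int)),
    (rev.foldl
      (fun (st : PySem.Dict String Int × List String) a =>
        let d := st.1.modify a 0 (· - 1)
        let k := d.getD a 0
        (d, st.2 ++ [if k = 0 then a else a ++ "_" ++ PySem.Int.toStr k]))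
      (d, out)).2 = out ++ (pvBuild pre rev.reverse).reverse := by
  induction rev with
  | nil => intro pre d out _; simp [pvBuild]
  | cons x rev' ih =>
    intro pre d out hv
    simp only [List.foldl_cons]
    have hcnt : ((pre ++ (x :: rev').reverse).count x : Int)
        = ((pre ++ rev'.reverse).count x : Int) + 1 := by
      rw [List.reverse_cons]
      push_cast [List.count_append, List.count_singleton_self]
      ring
    have hk : (d.modify x 0 (· - 1)).getD x 0 = (((pre ++ rev'.reverse).count x : Nat) : Int) := by
      rw [PySem.Dict.getD_modify_self, hv x, hcnt]; ring
    have hv' : ∀ a, (d.modify x 0 (· - 1)).getD a 0 = ((pre ++ rev'.reverse).count a : Int) := by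
      intro a
      rw [PySem.Dict.getD_modify]
      by_cases hax : a = x
      · subst hax; rw [if_pos rfl, hv a, hcnt]; ring
      · rw [if_neg hax, hv a]
        simp [List.count_append, Ne.symm hax]
    simp only [hk]
    rw [ih pre _ _ hv']
    rw [List.reverse_cons]
    rw [pvBuild_append rev'.reverse pre x]
    simp [List.append_assoc]
    rw [if_congr (by omega :
      ((List.count x pre : Int) + (List.count x rev' : Int) = 0)
        ↔ (List.count x pre = 0 ∧ List.count x rev' = 0)) rfl rfl]
-- ===== VERDICT (by name: the statement is the Claim_ definition above) =====
theorem add_rank_OLD_spec : Claim_equal_add_rank_OLD := by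
  intro args _
  unfold Spec_add_rank_OLD
  have hA : add_rank_OLD args = pvBuild [] args := by
    unfold add_rank_OLD
    rw [pvA_loop args [] PySem.Dict.empty []
          (by intro a; simp [PySem.Dict.contains_empty])
          (by intro a h; simp at h)]
    simp
  have hB : add_rank_OLD_alt args = pvBuild [] args := by
    have hcnt : ∀ a, (args.foldl
        (fun (d : PySem.Dict String Int) a => d.insert a (d.getD a 0 + 1))
        (PySem.Dict.empty : PySem.Dict String Int)).getD a 0
        = (([] ++ args.reverse.reverse).count a : Int) := by
      intro a
      rw [PySem.Dict.getD_foldl_insert_add_one]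
      simp
    have h := pvB_loop args.reverse []
      (args.foldl (fun (d : PySem.Dict String Int) a => d.insert a (d.getD a 0 + 1))
        (PySem.Dict.empty : PySem.Dict String Int)) [] hcnt
    have h2 : add_rank_OLD_alt args
        = ((args.reverse.foldl
            (fun (st : PySem.Dict String Int × List String) a =>
              let d := st.1.modify a 0 (· - 1)
              let k := d.getD a 0
              (d, st.2 ++ [if k = 0 then a else a ++ "_" ++ PySem.Int.toStr k]))
            ((args.foldl (fun (d : PySem.Dict String Int) a => d.insert a (d.getD a 0 + 1))
              (PySem.Dict.empty : PySem.Dict String Int)), [])).2).reverse := rfl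
    rw [h2, h]
    simp
  rw [hA, hB]
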